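-- pv_equiv track=rewrite | github.com/richstu/nano2pico | scripts/validate_unit_test_picos.py | strip_input
-- ===== SOURCE A (Python) =====
-- def strip_input(command):
--   no_input_list = []
--   input_arg = 0
--   for arg in command.split():
--     if input_arg == 2: input_arg = 0
--     if input_arg == 1: input_arg += 1
--     if arg == "-i": input_arg = 1
--     if input_arg == 0:
--       no_input_list.append(arg)
--   return ''.join(no_input_list)
-- ===== SOURCE B (Python) =====
-- def strip_input(command):
--   tokens = command.split()
--   return ''.join(t for t, prev in zip(tokens, [''] + tokens)
--                  if t != '-i' and prev != '-i')
-- ===== Notes on version B (the rewrite author's own statement) =====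
-- stated objective: simpler
-- what changed: Replaces A's three-branch 0/1/2 integer state machine with a single filtering comprehension over tokens zipped with their shifted-by-one predecessors (a token is kept iff neither it nor its predecessor is '-i').
import Mathlib
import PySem

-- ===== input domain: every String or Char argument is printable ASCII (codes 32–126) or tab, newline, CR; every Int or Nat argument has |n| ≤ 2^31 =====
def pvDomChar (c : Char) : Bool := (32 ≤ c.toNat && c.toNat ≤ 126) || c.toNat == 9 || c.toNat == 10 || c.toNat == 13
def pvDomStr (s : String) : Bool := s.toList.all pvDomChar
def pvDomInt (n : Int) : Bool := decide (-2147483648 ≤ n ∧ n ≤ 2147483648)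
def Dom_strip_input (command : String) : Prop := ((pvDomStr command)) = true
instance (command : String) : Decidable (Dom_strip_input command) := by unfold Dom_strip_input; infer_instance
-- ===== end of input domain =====

-- B drops the 0/1/2 state machine: filter tokens paired with their predecessor ('' sentinel); same return value, no speed claim.

-- ===== PORT A =====
def strip_input (command : String) : String :=
  let r := (PySem.Str.split₀ command).foldl (fun (st : List String × Int) arg =>
    let ia := if st.2 = 2 then 0 else st.2
    let ia := if ia = 1 then ia + 1 else ia
    let ia := if arg = "-i" then 1 else ia
    (if ia = 0 then st.1 ++ [arg] else st.1, ia)) ([], 0)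
  PySem.Str.join "" r.1

-- ===== PORT B =====
def strip_input_alt (command : String) : String :=
  let tokens := PySem.Str.split₀ command
  PySem.Str.join ""
    (((tokens.zip ("" :: tokens)).filter (fun tp => tp.1 != "-i" && tp.2 != "-i")).map Prod.fst)

-- ===== PRECONDITION & SPEC =====
def Spec_strip_input (command : String) (out : String) : Prop := out = strip_input_alt command
instance (command : String) (out : String) : Decidable (Spec_strip_input command out) := by unfold Spec_strip_input; infer_instance

-- ===== CLAIM (what is proved, stated in full; the proofs are below) =====
def Claim_equal_strip_input : Prop := ∀ (command : String), Dom_strip_input command → Spec_strip_input command (strip_input command)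

-- ===== LEMMAS AND PROOFS =====

-- A's loop state matters only through "was the previous token '-i'": state 1 ↔ previous token was "-i",
-- states 0 and 2 behave identically and correspond to a previous token (or the "" sentinel) ≠ "-i".
lemma strip_loop_eq (ts : List String) : ∀ (acc : List String) (s : Int) (p : String),
    ((s = 1 ∧ p = "-i") ∨ ((s = 0 ∨ s = 2) ∧ p ≠ "-i")) →
    ((ts.foldl (fun (st : List String × Int) arg =>
        let ia := if st.2 = 2 then 0 else st.2
        let ia := if ia = 1 then ia + 1 else ia
        let ia := if arg = "-i" then 1 else ia
        (if ia = 0 then st.1 ++ [arg] else st.1, ia)) (acc, s)).1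
      = acc ++ ((ts.zip (p :: ts)).filter (fun tp => tp.1 != "-i" && tp.2 != "-i")).map Prod.fst) := by
  induction ts with
  | nil => intro acc s p _; simp
  | cons arg ts ih =>
    intro acc s p hp
    rcases hp with ⟨hs, hp⟩ | ⟨hs, hp⟩
    · subst hs hp
      by_cases h : arg = "-i"
      · subst h
        simpa using ih acc 1 "-i" (Or.inl ⟨rfl, rfl⟩)
      · simpa [h] using ih acc 2 arg (Or.inr ⟨Or.inr rfl, h⟩)
    · by_cases h : arg = "-i"
      · subst h
        rcases hs with hs | hs <;> subst hs <;>
          simpa [hp] using ih acc 1 "-i" (Or.inl ⟨rfl, rfl⟩)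
      · rcases hs with hs | hs <;> subst hs <;>
          simpa [h, hp] using ih (acc ++ [arg]) 0 arg (Or.inr ⟨Or.inl rfl, h⟩)

-- ===== VERDICT (by name: the statement is the Claim_ definition above) =====
theorem strip_input_spec : Claim_equal_strip_input := by
  intro command _
  unfold Spec_strip_input strip_input strip_input_alt
  simp only []
  rw [strip_loop_eq (PySem.Str.split₀ command) [] 0 "" (Or.inr ⟨Or.inl rfl, by decide⟩)]
  simp
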